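-- pv_equiv track=rewrite | github.com/xiongsiheng/MLR | script/boundary_segmentation.py | auto_merge_paragraphs
-- ===== SOURCE A (Python) =====
-- from typing import Dict, List, Optional, Tuple, Set
--
-- def auto_merge_paragraphs(
--     paragraphs: List[str],
--     auto_merge_threshold: Optional[int],
--     auto_merge_group_size: Optional[int],
-- ) -> List[str]:
--     if auto_merge_threshold is None or auto_merge_group_size is None:
--         return paragraphs
--     if auto_merge_threshold <= 0 or auto_merge_group_size <= 1:
--         return paragraphs
--     if len(paragraphs) <= auto_merge_threshold:
--         return paragraphs
--
--     merged = []
--     for start in range(0, len(paragraphs), auto_merge_group_size):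
--         chunk = paragraphs[start : start + auto_merge_group_size]
--         merged.append("\n\n".join(chunk))
--     return merged
-- ===== SOURCE B (Python) =====
-- from typing import Dict, List, Optional, Tuple, Set
--
-- def auto_merge_paragraphs(
--     paragraphs: List[str],
--     auto_merge_threshold: Optional[int],
--     auto_merge_group_size: Optional[int],
-- ) -> List[str]:
--     if auto_merge_threshold is None or auto_merge_group_size is None:
--         return paragraphs
--     if auto_merge_threshold <= 0 or auto_merge_group_size <= 1:
--         return paragraphs
--     if len(paragraphs) <= auto_merge_threshold:
--         return paragraphs
--
--     merged = []
--     current = []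
--     for p in paragraphs:
--         current.append(p)
--         if len(current) == auto_merge_group_size:
--             merged.append("\n\n".join(current))
--             current = []
--     if current:
--         merged.append("\n\n".join(current))
--     return merged
-- ===== Notes on version B (the rewrite author's own statement) =====
-- stated objective: alternative
-- what changed: Replaced the range/slice window loop (index arithmetic plus per-chunk slicing) by a single pass over the paragraphs maintaining a running buffer that is flushed into the result each time it reaches the group size, with a final flush for the remainder.
import Mathlib
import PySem

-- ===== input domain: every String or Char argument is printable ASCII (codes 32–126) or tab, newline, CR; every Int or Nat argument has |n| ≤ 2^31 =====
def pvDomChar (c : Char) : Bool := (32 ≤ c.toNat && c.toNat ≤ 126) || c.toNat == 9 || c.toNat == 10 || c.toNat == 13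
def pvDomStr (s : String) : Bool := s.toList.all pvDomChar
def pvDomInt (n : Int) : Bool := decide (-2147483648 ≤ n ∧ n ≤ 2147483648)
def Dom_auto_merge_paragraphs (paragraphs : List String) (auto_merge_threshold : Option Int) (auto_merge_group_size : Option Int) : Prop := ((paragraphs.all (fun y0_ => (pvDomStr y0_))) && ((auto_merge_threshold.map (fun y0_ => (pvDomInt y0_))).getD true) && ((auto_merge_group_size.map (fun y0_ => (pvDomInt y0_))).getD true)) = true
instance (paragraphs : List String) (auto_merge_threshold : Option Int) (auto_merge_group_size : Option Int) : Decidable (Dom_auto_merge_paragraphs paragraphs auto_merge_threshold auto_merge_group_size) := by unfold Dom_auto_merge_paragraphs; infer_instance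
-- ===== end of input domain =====

-- B replaces A's slice-window range loop by a single pass with a running buffer that is
-- flushed each time it reaches the group size (different decomposition, same cost).

-- ===== PORT A =====
def auto_merge_paragraphs (paragraphs : List String) (auto_merge_threshold : Option Int) (auto_merge_group_size : Option Int) : List String :=
  match auto_merge_threshold with
  | none => paragraphs
  | some t =>
    match auto_merge_group_size with
    | none => paragraphs
    | some g =>
      if t ≤ 0 ∨ g ≤ 1 then paragraphs
      else if (paragraphs.length : Int) ≤ t then paragraphs
      else
        (PySem.List.pyRange 0 (paragraphs.length : Int) g).foldl
          (fun merged start =>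
            merged ++ [PySem.Str.join "\n\n" (PySem.List.slice paragraphs (some start) (some (start + g)))])
          []

-- ===== PORT B =====
-- one loop step of B: append p to the buffer, flush when it reaches the group size
def amStep (g : Int) (st : List String × List String) (p : String) : List String × List String :=
  let current := st.2 ++ [p]
  if (current.length : Int) = g then (st.1 ++ [PySem.Str.join "\n\n" current], [])
  else (st.1, current)

def auto_merge_paragraphs_alt (paragraphs : List String) (auto_merge_threshold : Option Int) (auto_merge_group_size : Option Int) : List String :=
  match auto_merge_threshold with
  | none => paragraphs
  | some t =>
    match auto_merge_group_size with
    | none => paragraphs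
    | some g =>
      if t ≤ 0 ∨ g ≤ 1 then paragraphs
      else if (paragraphs.length : Int) ≤ t then paragraphs
      else
        let st := paragraphs.foldl (amStep g) ([], [])
        if st.2 = [] then st.1 else st.1 ++ [PySem.Str.join "\n\n" st.2]

-- ===== PRECONDITION & SPEC =====
def Spec_auto_merge_paragraphs (paragraphs : List String) (auto_merge_threshold : Option Int) (auto_merge_group_size : Option Int) (out : List String) : Prop := out = auto_merge_paragraphs_alt paragraphs auto_merge_threshold auto_merge_group_size
instance (paragraphs : List String) (auto_merge_threshold : Option Int) (auto_merge_group_size : Option Int) (out : List String) : Decidable (Spec_auto_merge_paragraphs paragraphs auto_merge_threshold auto_merge_group_size out) := by unfold Spec_auto_merge_paragraphs; infer_instance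

-- ===== CLAIM (what is proved, stated in full; the proofs are below) =====
def Claim_equal_auto_merge_paragraphs : Prop := ∀ (paragraphs : List String) (auto_merge_threshold : Option Int) (auto_merge_group_size : Option Int), Dom_auto_merge_paragraphs paragraphs auto_merge_threshold auto_merge_group_size → Spec_auto_merge_paragraphs paragraphs auto_merge_threshold auto_merge_group_size (auto_merge_paragraphs paragraphs auto_merge_threshold auto_merge_group_size)

-- ===== LEMMAS AND PROOFS =====

-- reference chunking function both sides are reduced to
def amChunks (g : Nat) : List String → List String
  | [] => []
  | x :: rest =>
      PySem.Str.join "\n\n" (x :: rest.take (g - 1)) :: amChunks g (rest.drop (g - 1))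
termination_by xs => xs.length
decreasing_by
  simp only [List.length_cons, List.length_drop]; omega

lemma amChunks_take_drop (g : Nat) (hg : 1 ≤ g) (ys : List String) (hys : ys ≠ []) :
    amChunks g ys = PySem.Str.join "\n\n" (ys.take g) :: amChunks g (ys.drop g) := by
  cases ys with
  | nil => exact absurd rfl hys
  | cons x rest =>
    rw [amChunks]
    obtain ⟨k, rfl⟩ : ∃ k, g = k + 1 := ⟨g - 1, by omega⟩
    simp

lemma pyRange_shift (a b c s : Int) (hs : 0 < s) :
    PySem.List.pyRange (a + c) (b + c) s = (PySem.List.pyRange a b s).map (· + c) := by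
  rw [PySem.List.pyRange_of_pos _ _ hs, PySem.List.pyRange_of_pos _ _ hs, List.map_map]
  simp only [show b + c - (a + c) = b - a from by ring]
  rw [if_congr (by omega : a + c < b + c ↔ a < b) rfl rfl]
  apply List.map_congr_left
  intro k _
  simp only [Function.comp_apply]
  ring

lemma pyRange_pos_cons (a b s : Int) (hs : 0 < s) (hab : a < b) :
    PySem.List.pyRange a b s = a :: PySem.List.pyRange (a + s) b s := by
  rw [PySem.List.pyRange_of_pos _ _ hs, PySem.List.pyRange_of_pos _ _ hs, if_pos hab]
  by_cases h : a + s < b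
  · rw [if_pos h]
    have hq : (b - a + s - 1) / s = (b - (a + s) + s - 1) / s + 1 := by
      have e : b - a + s - 1 = (b - (a + s) + s - 1) + 1 * s := by ring
      rw [e, Int.add_mul_ediv_right _ _ (by omega : s ≠ 0)]
    have hnn : 0 ≤ (b - (a + s) + s - 1) / s := Int.ediv_nonneg (by omega) (by omega)
    have ht : ((b - a + s - 1) / s).toNat = ((b - (a + s) + s - 1) / s).toNat + 1 := by omega
    rw [ht, List.range_succ_eq_map]
    simp only [List.map_cons, List.map_map, Nat.cast_zero, mul_zero, add_zero, List.cons.injEq]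
    refine ⟨trivial, ?_⟩
    apply List.map_congr_left
    intro k _
    simp only [Function.comp_apply]
    push_cast
    ring
  · rw [if_neg h]
    have h1 : (b - a + s - 1) / s = 1 := by
      have e : b - a + s - 1 = (b - a - 1) + 1 * s := by ring
      rw [e, Int.add_mul_ediv_right _ _ (by omega : s ≠ 0),
        Int.ediv_eq_zero_of_lt (by omega) (by omega)]
      omega
    rw [h1]
    simp [List.range_succ]

-- A's fold appends one element per index: it is a map
lemma foldl_append_map {α β : Type} (f : α → β) (l : List α) (acc : List β) :
    l.foldl (fun m s => m ++ [f s]) acc = acc ++ l.map f := by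
  induction l generalizing acc with
  | nil => simp
  | cons x xs ih => simp [ih, List.append_assoc]

-- A's map over the stepped range is amChunks
lemma A_map_eq_chunks (g : Int) (hg : 1 ≤ g) :
    ∀ (n : ℕ) (xs : List String), xs.length = n →
      (PySem.List.pyRange 0 (xs.length : Int) g).map
        (fun s => PySem.Str.join "\n\n" (PySem.List.slice xs (some s) (some (s + g)))) =
      amChunks g.toNat xs := by
  intro n
  induction n using Nat.strong_induction_on with
  | _ n ih =>
    intro xs hn
    cases xs with
    | nil =>
      rw [PySem.List.pyRange_of_pos _ _ (by omega : (0:Int) < g)]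
      simp [amChunks]
    | cons x rest =>
      have hcast : ((g.toNat : Int)) = g := Int.toNat_of_nonneg (by omega)
      have hlen : (0:Int) < (((x :: rest).length : ℕ) : Int) := by
        simp only [List.length_cons]; push_cast; omega
      rw [pyRange_pos_cons 0 _ g (by omega) hlen, List.map_cons]
      have hhead : PySem.Str.join "\n\n"
          (PySem.List.slice (x :: rest) (some 0) (some (0 + g))) =
          PySem.Str.join "\n\n" (x :: rest.take (g.toNat - 1)) := by
        rw [PySem.List.slice_toNat _ (by omega) (by omega)]
        have : (0 + g).toNat = (g.toNat - 1) + 1 := by omega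
        rw [this]
        simp
      rw [hhead]
      have htail : (PySem.List.pyRange (0 + g) (((x :: rest).length : ℕ) : Int) g).map
          (fun s => PySem.Str.join "\n\n" (PySem.List.slice (x :: rest) (some s) (some (s + g)))) =
          amChunks g.toNat (rest.drop (g.toNat - 1)) := by
        set m : Int := (((x :: rest).length : ℕ) : Int) with hm
        have hdx : (x :: rest).drop g.toNat = rest.drop (g.toNat - 1) := by
          have : g.toNat = (g.toNat - 1) + 1 := by omega
          rw [this]
          simp
        by_cases hbig : m ≤ g
        · have h1 : PySem.List.pyRange (0 + g) m g = [] := by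
            rw [PySem.List.pyRange_of_pos _ _ (by omega : (0:Int) < g),
              if_neg (by omega)]
            simp
          have h2 : rest.drop (g.toNat - 1) = [] := by
            apply List.drop_eq_nil_of_le
            have : ((rest.length : Int)) = m - 1 := by
              rw [hm]; simp only [List.length_cons]; push_cast; ring
            omega
          rw [h1, h2]
          simp [amChunks]
        · have hshift : PySem.List.pyRange (0 + g) m g =
              (PySem.List.pyRange 0 (m - g) g).map (· + g) := by
            have h := pyRange_shift 0 (m - g) g g (by omega)
            rw [show m - g + g = m from by ring] at h
            exact h
          rw [hshift, List.map_map]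
          have hmr : m = (rest.length : Int) + 1 := by
            rw [hm]; simp only [List.length_cons]; push_cast; ring
          have hlend : (((( (x :: rest).drop g.toNat).length : ℕ)) : Int) = m - g := by
            simp only [List.length_drop, List.length_cons]
            omega
          have hcongr : ((PySem.List.pyRange 0 (m - g) g).map
              ((fun s => PySem.Str.join "\n\n" (PySem.List.slice (x :: rest) (some s) (some (s + g)))) ∘ (· + g))) =
              (PySem.List.pyRange 0 (m - g) g).map
              (fun s => PySem.Str.join "\n\n" (PySem.List.slice ((x :: rest).drop g.toNat) (some s) (some (s + g)))) := by
            apply List.map_congr_left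
            intro s hs
            have hs0 : 0 ≤ s := by
              rcases (PySem.List.mem_pyRange_iff_of_pos (by omega : (0:Int) < g) s).mp hs with ⟨h1, _, _⟩
              omega
            simp only [Function.comp_apply]
            rw [PySem.List.slice_toNat _ (by omega) (by omega),
              PySem.List.slice_toNat _ (by omega) (by omega)]
            rw [List.drop_drop]
            have e1 : g.toNat + s.toNat = (s + g).toNat := by omega
            have e2 : (s + g).toNat - s.toNat = (s + g + g).toNat - (s + g).toNat := by omega
            rw [e1, e2]
          rw [hcongr, ← hlend,
            ih ((x :: rest).drop g.toNat).length
              (by simp only [List.length_drop, List.length_cons]; omega)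
              _ rfl,
            hdx]
      rw [htail, amChunks]

-- B's fold with buffer computes amChunks of (buffer ++ rest)
lemma B_inv (g : Int) (hg : 1 ≤ g) :
    ∀ (xs m c : List String), c.length < g.toNat →
      (let st := xs.foldl (amStep g) (m, c)
       if st.2 = [] then st.1 else st.1 ++ [PySem.Str.join "\n\n" st.2]) =
      m ++ amChunks g.toNat (c ++ xs) := by
  intro xs
  induction xs with
  | nil =>
    intro m c hc
    simp only [List.foldl_nil, List.append_nil]
    by_cases h : c = []
    · subst h
      simp [amChunks]
    · rw [if_neg h]
      obtain ⟨y, r, rfl⟩ := List.exists_cons_of_ne_nil h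
      have h1 : r.take (g.toNat - 1) = r := by
        apply List.take_of_length_le
        simp only [List.length_cons] at hc
        omega
      have h2 : r.drop (g.toNat - 1) = [] := by
        apply List.drop_eq_nil_of_le
        simp only [List.length_cons] at hc
        omega
      rw [amChunks, h1, h2, amChunks]
  | cons x xs ih =>
    intro m c hc
    simp only [List.foldl_cons]
    by_cases h : c.length + 1 = g.toNat
    · have hstep : amStep g (m, c) x = (m ++ [PySem.Str.join "\n\n" (c ++ [x])], []) := by
        simp only [amStep]
        rw [if_pos (by simp only [List.length_append, List.length_cons, List.length_nil]; omega)]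
      rw [hstep, ih _ [] (by simp only [List.length_nil]; omega)]
      rw [amChunks_take_drop g.toNat (by omega) (c ++ x :: xs) (by simp)]
      have hsplit : c ++ x :: xs = (c ++ [x]) ++ xs := by simp
      have ht : (c ++ x :: xs).take g.toNat = c ++ [x] := by
        rw [hsplit]
        apply List.take_left'
        simp only [List.length_append, List.length_cons, List.length_nil]
        omega
      have hd : (c ++ x :: xs).drop g.toNat = xs := by
        rw [hsplit]
        apply List.drop_left'
        simp only [List.length_append, List.length_cons, List.length_nil]
        omega
      rw [ht, hd]
      simp
    · have hstep : amStep g (m, c) x = (m, c ++ [x]) := by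
        simp only [amStep]
        rw [if_neg (by simp only [List.length_append, List.length_cons, List.length_nil]; omega)]
      rw [hstep, ih _ (c ++ [x]) (by simp only [List.length_append, List.length_cons, List.length_nil]; omega)]
      simp

-- ===== VERDICT (by name: the statement is the Claim_ definition above) =====
theorem auto_merge_paragraphs_spec : Claim_equal_auto_merge_paragraphs := by
  intro paragraphs t? g? _
  unfold Spec_auto_merge_paragraphs
  cases t? with
  | none => rfl
  | some t =>
    cases g? with
    | none => rfl
    | some g =>
      simp only [auto_merge_paragraphs, auto_merge_paragraphs_alt]
      by_cases h1 : t ≤ 0 ∨ g ≤ 1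
      · rw [if_pos h1, if_pos h1]
      · rw [if_neg h1, if_neg h1]
        by_cases h2 : (paragraphs.length : Int) ≤ t
        · rw [if_pos h2, if_pos h2]
        · rw [if_neg h2, if_neg h2]
          have hg : 1 ≤ g := by omega
          rw [foldl_append_map
            (fun s => PySem.Str.join "\n\n" (PySem.List.slice paragraphs (some s) (some (s + g))))]
          rw [List.nil_append,
            A_map_eq_chunks g hg paragraphs.length paragraphs rfl]
          have := B_inv g hg paragraphs [] [] (by simp; omega)
          simp only [List.nil_append] at this
          exact this.symm
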